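-- pv_equiv track=rewrite | github.com/amBITionV2/Crazy_developers-527A-AI-09 | bloodaid-backend/app/services/eraktkosh_service.py | _get_compatible_blood_groups
-- ===== SOURCE A (Python) =====
-- from typing import Optional, Dict, List, Any
--
-- def _get_compatible_blood_groups(blood_group: str) -> List[str]:
--     """Get compatible blood groups for emergency search."""
--     compatibility_map = {
--         "A+": ["A+", "A-", "O+", "O-"],
--         "A-": ["A-", "O-"],
--         "B+": ["B+", "B-", "O+", "O-"],
--         "B-": ["B-", "O-"],
--         "AB+": ["A+", "A-", "B+", "B-", "AB+", "AB-", "O+", "O-"],  # Universal recipient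
--         "AB-": ["A-", "B-", "AB-", "O-"],
--         "O+": ["O+", "O-"],
--         "O-": ["O-"]  # Can only receive O-
--     }
--
--     compatible = compatibility_map.get(blood_group, [])
--     return [bg for bg in compatible if bg != blood_group]  # Exclude the original group
-- ===== SOURCE B (Python) =====
-- # B: derives each compatibility list from the ABO-subset + Rh rule over a fixed
-- # canonical order, instead of a hard-coded table (objective: alternative).
--
-- def _get_compatible_blood_groups(blood_group):
--     """Get compatible blood groups for emergency search."""
--     groups = ["A+", "A-", "B+", "B-", "AB+", "AB-", "O+", "O-"]
--     if blood_group not in groups: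
--         return []
--     has_a = "A" in blood_group
--     has_b = "B" in blood_group
--     rh_pos = blood_group.endswith("+")
--     out = []
--     for g in groups:
--         if g == blood_group:
--             continue
--         if "A" in g and not has_a:
--             continue
--         if "B" in g and not has_b:
--             continue
--         if g.endswith("+") and not rh_pos:
--             continue
--         out.append(g)
--     return out
-- ===== Notes on version B (the rewrite author's own statement) =====
-- stated objective: alternative
-- what changed: B replaces the hard-coded 8-entry compatibility table with a rule-based filter: it validates the group, extracts its ABO antigens and Rh sign, and keeps each group of the canonical order whose antigens are a subset of the recipient's and whose Rh is compatible.
import Mathlib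
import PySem

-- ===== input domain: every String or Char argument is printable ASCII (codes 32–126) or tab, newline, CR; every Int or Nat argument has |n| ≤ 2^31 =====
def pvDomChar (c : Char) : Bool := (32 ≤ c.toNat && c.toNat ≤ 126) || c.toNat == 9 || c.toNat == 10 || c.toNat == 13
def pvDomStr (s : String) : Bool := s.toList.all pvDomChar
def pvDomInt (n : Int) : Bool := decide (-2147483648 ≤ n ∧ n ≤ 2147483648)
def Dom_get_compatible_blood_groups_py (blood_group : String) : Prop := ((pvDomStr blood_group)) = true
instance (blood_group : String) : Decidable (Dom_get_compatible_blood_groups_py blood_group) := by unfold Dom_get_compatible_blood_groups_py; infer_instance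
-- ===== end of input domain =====

-- B re-derives the table by the ABO-subset + Rh biological rule over the canonical
-- group order (objective: alternative; no speed claim).

-- ===== PORT A =====
def get_compatible_blood_groups_py (blood_group : String) : List String :=
  let compatibility_map : PySem.Dict String (List String) :=
    PySem.Dict.ofList
      [("A+", ["A+", "A-", "O+", "O-"]),
       ("A-", ["A-", "O-"]),
       ("B+", ["B+", "B-", "O+", "O-"]),
       ("B-", ["B-", "O-"]),
       ("AB+", ["A+", "A-", "B+", "B-", "AB+", "AB-", "O+", "O-"]),
       ("AB-", ["A-", "B-", "AB-", "O-"]),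
       ("O+", ["O+", "O-"]),
       ("O-", ["O-"])]
  let compatible := compatibility_map.getD blood_group []
  compatible.filter (fun bg => bg != blood_group)

-- ===== PORT B =====
def get_compatible_blood_groups_py_alt (blood_group : String) : List String :=
  let groups : List String := ["A+", "A-", "B+", "B-", "AB+", "AB-", "O+", "O-"]
  if ¬ (blood_group ∈ groups) then []
  else
    let has_a := PySem.Str.isIn "A" blood_group
    let has_b := PySem.Str.isIn "B" blood_group
    let rh_pos := PySem.Str.endswith blood_group "+"
    groups.foldl (fun out g =>
      if g == blood_group then out
      else if PySem.Str.isIn "A" g && !has_a then out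
      else if PySem.Str.isIn "B" g && !has_b then out
      else if PySem.Str.endswith g "+" && !rh_pos then out
      else out ++ [g]) []

-- ===== PRECONDITION & SPEC =====
def Spec_get_compatible_blood_groups_py (blood_group : String) (out : List String) : Prop := out = get_compatible_blood_groups_py_alt blood_group
instance (blood_group : String) (out : List String) : Decidable (Spec_get_compatible_blood_groups_py blood_group out) := by unfold Spec_get_compatible_blood_groups_py; infer_instance

-- ===== CLAIM (what is proved, stated in full; the proofs are below) =====
def Claim_equal_get_compatible_blood_groups_py : Prop := ∀ (blood_group : String), Dom_get_compatible_blood_groups_py blood_group → Spec_get_compatible_blood_groups_py blood_group (get_compatible_blood_groups_py blood_group)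

-- ===== LEMMAS AND PROOFS =====

-- Outside the eight valid groups both programs return [].
lemma pv_invalid (bg : String)
    (h1 : bg ≠ "A+") (h2 : bg ≠ "A-") (h3 : bg ≠ "B+") (h4 : bg ≠ "B-")
    (h5 : bg ≠ "AB+") (h6 : bg ≠ "AB-") (h7 : bg ≠ "O+") (h8 : bg ≠ "O-") :
    get_compatible_blood_groups_py bg = get_compatible_blood_groups_py_alt bg := by
  have e1 : ("A+" == bg) = false := beq_eq_false_iff_ne.mpr (Ne.symm h1)
  have e2 : ("A-" == bg) = false := beq_eq_false_iff_ne.mpr (Ne.symm h2)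
  have e3 : ("B+" == bg) = false := beq_eq_false_iff_ne.mpr (Ne.symm h3)
  have e4 : ("B-" == bg) = false := beq_eq_false_iff_ne.mpr (Ne.symm h4)
  have e5 : ("AB+" == bg) = false := beq_eq_false_iff_ne.mpr (Ne.symm h5)
  have e6 : ("AB-" == bg) = false := beq_eq_false_iff_ne.mpr (Ne.symm h6)
  have e7 : ("O+" == bg) = false := beq_eq_false_iff_ne.mpr (Ne.symm h7)
  have e8 : ("O-" == bg) = false := beq_eq_false_iff_ne.mpr (Ne.symm h8)
  simp [get_compatible_blood_groups_py, get_compatible_blood_groups_py_alt,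
    PySem.Dict.ofList, PySem.Dict.getD, PySem.Dict.get?, PySem.Dict.insert,
    PySem.Dict.update, PySem.Dict.empty, PySem.Dict.contains, List.find?,
    e1, e2, e3, e4, e5, e6, e7, e8, h1, h2, h3, h4, h5, h6, h7, h8]

-- ===== VERDICT (by name: the statement is the Claim_ definition above) =====
theorem get_compatible_blood_groups_py_spec : Claim_equal_get_compatible_blood_groups_py := by
  intro bg _
  unfold Spec_get_compatible_blood_groups_py
  by_cases h1 : bg = "A+"; · subst h1; decide
  by_cases h2 : bg = "A-"; · subst h2; decide
  by_cases h3 : bg = "B+"; · subst h3; decide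
  by_cases h4 : bg = "B-"; · subst h4; decide
  by_cases h5 : bg = "AB+"; · subst h5; decide
  by_cases h6 : bg = "AB-"; · subst h6; decide
  by_cases h7 : bg = "O+"; · subst h7; decide
  by_cases h8 : bg = "O-"; · subst h8; decide
  exact pv_invalid bg h1 h2 h3 h4 h5 h6 h7 h8
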